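-- pv_equiv track=rewrite | github.com/joaojunior/hackerrank | bird-and-maximum-fruit-gathering/bird.py | bird
-- ===== SOURCE A (Python) =====
-- def bird(values, size_pass):
--     result = 0
--
--     n = len(values)
--     if size_pass > n:
--         size_pass = n
--     for i in range(n):
--         if i + size_pass < n:
--             result_aux = sum(values[i:i+size_pass])
--         else:
--             result_aux = sum(values[i:n]) + sum(values[0:size_pass-(n-i)])
--         if result_aux > result:
--             result = result_aux
--     return result
-- ===== SOURCE B (Python) =====
-- def bird(values, size_pass):
--     # O(n) prefix-sum rewrite: window sums over the doubled list come from
--     # prefix-sum differences instead of re-summing each slice.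
--     n = len(values)
--     k = min(size_pass, n)
--     d = values + values
--     prefix = [0]
--     acc = 0
--     for v in d:
--         acc += v
--         prefix.append(acc)
--     best = 0
--     for i in range(n):
--         w = prefix[i + k] - prefix[i]
--         if w > best:
--             best = w
--     return best
-- ===== Notes on version B (the rewrite author's own statement) =====
-- stated objective: faster
-- what changed: Replaced per-position slice re-summation with one prefix-sum array over the doubled list, so each circular window sum is a single subtraction.
-- outside the precondition, e.g. on bird([1, 2, 3], -1): A returns 3, B returns 12
import Mathlib
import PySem

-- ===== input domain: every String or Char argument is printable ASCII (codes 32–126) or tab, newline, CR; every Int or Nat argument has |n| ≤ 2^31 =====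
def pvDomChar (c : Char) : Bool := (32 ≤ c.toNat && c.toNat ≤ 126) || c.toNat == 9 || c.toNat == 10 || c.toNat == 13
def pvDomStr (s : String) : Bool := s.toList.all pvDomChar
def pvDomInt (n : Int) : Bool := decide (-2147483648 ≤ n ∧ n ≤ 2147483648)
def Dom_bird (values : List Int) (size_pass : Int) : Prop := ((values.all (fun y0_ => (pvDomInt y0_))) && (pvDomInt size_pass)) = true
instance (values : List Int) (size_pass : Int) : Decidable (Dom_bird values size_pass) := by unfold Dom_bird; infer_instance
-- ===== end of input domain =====

-- B replaces A's per-position slice summation by a prefix-sum array over the doubled list (O(n) vs O(n*size_pass)).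

-- ===== PORT A =====
def bird (values : List Int) (size_pass : Int) : Int :=
  let n : Int := values.length
  let sp : Int := if size_pass > n then n else size_pass
  (PySem.List.pyRange 0 n 1).foldl (fun result i =>
    let result_aux :=
      if i + sp < n then (PySem.List.slice values (some i) (some (i + sp))).sum
      else (PySem.List.slice values (some i) (some n)).sum +
           (PySem.List.slice values (some 0) (some (sp - (n - i)))).sum
    if result_aux > result then result_aux else result) 0

-- ===== PORT B =====
def bird_alt (values : List Int) (size_pass : Int) : Int :=
  let n : Int := values.length
  let k : Int := min size_pass n
  let d := values ++ values
  let pfx := (d.foldl (fun (st : List Int × Int) v => (st.1 ++ [st.2 + v], st.2 + v)) ([0], 0)).1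
  -- prefix[i + k] / prefix[i]: indices are in range whenever 0 ≤ k (Pre_), so pyGetD is exact here
  (PySem.List.pyRange 0 n 1).foldl (fun best i =>
    let w := PySem.List.pyGetD pfx (i + k) 0 - PySem.List.pyGetD pfx i 0
    if w > best then w else best) 0

-- ===== PRECONDITION & SPEC =====
-- Pre_ excludes negative size_pass, outside the task's natural domain: there both programs produce
-- accidental Python negative-slice / negative-index values (different junk), e.g. A returns 3 and B 12 on ([1,2,3], -1).
def Pre_bird (_values : List Int) (size_pass : Int) : Prop := 0 ≤ size_pass
instance (values : List Int) (size_pass : Int) : Decidable (Pre_bird values size_pass) := by unfold Pre_bird; infer_instance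
def pvWitness_bird : List Int × Int := ([3, -1, 4, 1], 2)
def Spec_bird (values : List Int) (size_pass : Int) (out : Int) : Prop := out = bird_alt values size_pass
instance (values : List Int) (size_pass : Int) (out : Int) : Decidable (Spec_bird values size_pass out) := by unfold Spec_bird; infer_instance

-- ===== CLAIM (what is proved, stated in full; the proofs are below) =====
def Claim_equal_bird : Prop := ∀ (values : List Int) (size_pass : Int), Dom_bird values size_pass → Pre_bird values size_pass → Spec_bird values size_pass (bird values size_pass)

-- ===== LEMMAS AND PROOFS =====
theorem pv_prefix_fold (d : List Int) : ∀ (p : List Int) (acc : Int),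
    (d.foldl (fun (st : List Int × Int) v => (st.1 ++ [st.2 + v], st.2 + v)) (p, acc)).1
    = p ++ (List.range d.length).map (fun j => acc + (d.take (j+1)).sum) := by
  induction d with
  | nil => intro p acc; simp
  | cons v t ih =>
    intro p acc
    simp only [List.foldl_cons]
    rw [ih]
    rw [List.length_cons, List.range_succ_eq_map]
    simp [List.map_map, List.append_assoc, Function.comp]
    intro a _
    ring
theorem pv_prefix_get (d : List Int) (m : Nat) (hm : m ≤ d.length) :
    PySem.List.pyGetD ((d.foldl (fun (st : List Int × Int) v => (st.1 ++ [st.2 + v], st.2 + v)) ([0], 0)).1) (m : Int) 0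
    = (d.take m).sum := by
  rw [pv_prefix_fold, PySem.List.pyGetD_natCast]
  cases m with
  | zero => simp
  | succ j =>
    have hj : j < d.length := by omega
    rw [List.singleton_append, List.getD_cons_succ]
    rw [List.getD_eq_getElem _ _ (by simpa using hj)]
    simp
theorem pv_window (values : List Int) (kN i : Nat) (_hk : kN ≤ values.length) (hi : i < values.length) :
    (((values ++ values).drop i).take kN).sum
    = if (i : Int) + kN < values.length then (PySem.List.slice values (some (i:Int)) (some ((i:Int) + kN))).sum
      else (PySem.List.slice values (some (i:Int)) (some (values.length:Int))).sum +
           (PySem.List.slice values (some 0) (some ((kN:Int) - ((values.length:Int) - i)))).sum := by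
  have hdrop : (values ++ values).drop i = values.drop i ++ values := by
    rw [List.drop_append]
    have : i - values.length = 0 := by omega
    rw [this, List.drop_zero]
  have hlen : (values.drop i).length = values.length - i := by simp
  split_ifs with h
  · -- i + kN < n
    have hkn : i + kN < values.length := by exact_mod_cast h
    rw [PySem.List.slice_natCast_add, hdrop,
        List.take_append_of_le_length (by omega)]
  · -- i + kN ≥ n
    have hkn : values.length ≤ i + kN := by
      by_contra hc
      exact h (by omega)
    have hm : (kN:Int) - ((values.length:Int) - i) = ((kN - (values.length - i) : Nat) : Int) := by
      omega
    rw [hm, PySem.List.slice_natCast, hdrop, List.take_append,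
        List.take_of_length_le (by omega), PySem.List.slice_zero_start,
        PySem.List.slice_to_natCast, List.sum_append, hlen]
    have h1 : (values.drop i).take (values.length - i) = values.drop i :=
      List.take_of_length_le (by omega)
    rw [h1]

theorem bird_eq_alt (values : List Int) (size_pass : Int) (hs : 0 ≤ size_pass) :
    bird values size_pass = bird_alt values size_pass := by
  obtain ⟨kN, hkN⟩ : ∃ kN : Nat, min size_pass ((values.length : Nat) : Int) = (kN : Int) :=
    ⟨(min size_pass ((values.length : Nat) : Int)).toNat, by omega⟩
  have hkle : kN ≤ values.length := by omega
  simp only [bird, bird_alt]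
  have hsp : (if size_pass > ((values.length : Nat) : Int) then ((values.length : Nat) : Int) else size_pass)
      = (kN : Int) := by rw [← hkN]; split_ifs <;> omega
  rw [hsp, hkN, PySem.List.pyRange_one]
  have hlen0 : ((((values.length : Nat) : Int)) - 0).toNat = values.length := by omega
  rw [hlen0, List.foldl_map, List.foldl_map]
  apply PySem.List.foldl_congr_mem
  intro acc a ha
  have haN : a < values.length := List.mem_range.mp ha
  simp only [zero_add]
  have hcast : (a : Int) + (kN : Int) = ((a + kN : Nat) : Int) := by push_cast; ring
  rw [hcast, pv_prefix_get _ _ (by simp; omega), pv_prefix_get _ _ (by simp; omega)]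
  have hw : ((values ++ values).take (a + kN)).sum - ((values ++ values).take a).sum
      = (((values ++ values).drop a).take kN).sum := by
    rw [List.take_add, List.sum_append]; ring
  rw [hw, pv_window values kN a hkle haN, ← hcast]

-- ===== VERDICT (by name: the statement is the Claim_ definition above) =====
theorem bird_spec : Claim_equal_bird := by
  intro values size_pass _hd hp
  exact bird_eq_alt values size_pass hp
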